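-- pv_equiv track=rewrite | github.com/billpaps/Big-university-projects | Profile Vasileios Papapstolou/Some of my analysis projects/crypto_2021/ask1_otp.py | bit_to_word
-- ===== SOURCE A (Python) =====
-- def bit_to_word(plaintext):
--     pinakas1c = ['A', 'B', 'C', 'D', 'E', 'F', 'G', 'H', 'I', 'J', 'K', 'L', 'M', 'N', 'O', 'P', 'Q', 'R', 'S', 'T',
--                  'U', 'V', 'W', 'X', 'Y', 'Z', '.', '!', '?', '(', ')', '-']
--     pinakas1 = [0, 1, 2, 3, 4, 5, 6, 7, 8, 9, 10, 11, 12, 13, 14, 15, 16, 17, 18, 19, 20, 21, 22, 23, 24, 25, 26, 27,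
--                 28, 29, 30, 31]
--
--     new_plaintext_list = []
--     for i in plaintext:
--         for j in range(32):
--             if i == pinakas1[j]:
--                 new_plaintext_list.append(pinakas1c[j])
--     return new_plaintext_list
-- ===== SOURCE B (Python) =====
-- def bit_to_word(plaintext):
--     punct = ".!?()-"
--     return [chr(65 + i) if i < 26 else punct[i - 26]
--             for i in plaintext if 0 <= i < 32]
-- ===== Notes on version B (the rewrite author's own statement) =====
-- stated objective: simpler
-- what changed: Drops both lookup tables entirely: B filters by the range condition 0 <= i < 32 and computes each character by a closed-form formula (chr(65+i) for letters, a 6-char punctuation string indexed by i-26), instead of A's per-element 32-step scan comparing against a value table.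
import Mathlib
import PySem

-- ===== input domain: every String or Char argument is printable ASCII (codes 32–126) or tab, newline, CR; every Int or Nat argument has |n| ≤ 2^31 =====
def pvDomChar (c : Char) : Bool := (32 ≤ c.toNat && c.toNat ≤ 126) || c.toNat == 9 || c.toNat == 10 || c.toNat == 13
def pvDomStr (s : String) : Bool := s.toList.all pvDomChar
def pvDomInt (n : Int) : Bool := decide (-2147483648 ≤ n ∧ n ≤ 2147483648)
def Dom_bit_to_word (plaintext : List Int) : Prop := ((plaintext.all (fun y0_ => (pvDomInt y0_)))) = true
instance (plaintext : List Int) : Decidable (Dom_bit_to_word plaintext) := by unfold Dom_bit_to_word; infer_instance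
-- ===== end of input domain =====

-- B drops A's lookup tables and 32-step inner scan: it filters by the range test 0 <= i < 32 and
-- computes each character by a closed-form formula (chr arithmetic for letters, a 6-char
-- punctuation string for codes 26..31) (objective: simpler).

-- ===== PORT A =====
def pvPinakas1c : List String :=
  ["A", "B", "C", "D", "E", "F", "G", "H", "I", "J", "K", "L", "M", "N", "O", "P", "Q", "R", "S", "T",
   "U", "V", "W", "X", "Y", "Z", ".", "!", "?", "(", ")", "-"]

def pvPinakas1 : List Int :=
  [0, 1, 2, 3, 4, 5, 6, 7, 8, 9, 10, 11, 12, 13, 14, 15, 16, 17, 18, 19, 20, 21, 22, 23, 24, 25, 26, 27,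
   28, 29, 30, 31]

def bit_to_word (plaintext : List Int) : List String :=
  plaintext.foldl (fun acc i =>
    (PySem.List.pyRange 0 32 1).foldl (fun acc2 j =>
      if i == PySem.List.pyGetD pvPinakas1 j 0 then acc2 ++ [PySem.List.pyGetD pvPinakas1c j ""] else acc2)
      acc) []

-- ===== PORT B =====
-- chr(65 + i) if i < 26 else punct[i - 26], for i in plaintext if 0 <= i < 32
-- (the '.getD ""' is only a totality guard: for 26 <= i < 32 the index i-26 is always in range)
def pvBChar (i : Int) : Option String :=
  if 0 ≤ i ∧ i < 32 then
    some (if i < 26 then String.ofList [Char.ofNat (65 + i).toNat]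
          else ((PySem.Str.pyGet? ".!?()-" (i - 26)).map (fun c => String.ofList [c])).getD "")
  else none

def bit_to_word_alt (plaintext : List Int) : List String :=
  plaintext.filterMap pvBChar

-- ===== PRECONDITION & SPEC =====
def Spec_bit_to_word (plaintext : List Int) (out : List String) : Prop := out = bit_to_word_alt plaintext
instance (plaintext : List Int) (out : List String) : Decidable (Spec_bit_to_word plaintext out) := by unfold Spec_bit_to_word; infer_instance

-- ===== CLAIM =====
def Claim_equal_bit_to_word : Prop := ∀ (plaintext : List Int), Dom_bit_to_word plaintext → Spec_bit_to_word plaintext (bit_to_word plaintext)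

-- ===== LEMMAS AND PROOFS =====

-- For an index inside the scanned range, A's value table is the identity.
set_option maxHeartbeats 1600000 in
lemma pvPinakas1_getD (j : Int) (h0 : 0 ≤ j) (h1 : j < 32) :
    PySem.List.pyGetD pvPinakas1 j 0 = j := by
  interval_cases j <;> decide

-- Per element: A's inner 32-step scan appends exactly the (at most one) character B computes.
set_option maxHeartbeats 1600000 in
lemma pvInner_eq (i : Int) (acc : List String) :
    (PySem.List.pyRange 0 32 1).foldl (fun acc2 j =>
      if i == PySem.List.pyGetD pvPinakas1 j 0 then acc2 ++ [PySem.List.pyGetD pvPinakas1c j ""] else acc2)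
      acc = acc ++ (pvBChar i).toList := by
  rw [PySem.List.foldl_append_if]
  congr 1
  by_cases h : 0 ≤ i ∧ i < 32
  · obtain ⟨h0, h1⟩ := h
    interval_cases i <;> decide
  · rw [show pvBChar i = none by simp [pvBChar, h]]
    simp only [Option.toList_none, List.map_eq_nil_iff, List.filter_eq_nil_iff]
    intro j hj
    have hb := (PySem.List.mem_pyRange_one.mp hj)
    rw [pvPinakas1_getD j hb.1 hb.2]
    simp only [beq_iff_eq]
    omega

-- ===== VERDICT =====
theorem bit_to_word_spec : Claim_equal_bit_to_word := by
  intro plaintext _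
  unfold Spec_bit_to_word bit_to_word bit_to_word_alt
  simp only [pvInner_eq]
  rw [PySem.List.foldl_append_eq_flatMap]
  simp only [List.nil_append]
  exact (List.filterMap_eq_flatMap_toList _ _).symm
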